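-- pv_equiv track=rewrite | github.com/shehzanwar/PL-Predictor | features/form_features.py | _compute_unbeaten_run
-- ===== SOURCE A (Python) =====
-- def _compute_unbeaten_run(results: list[str]) -> list[int]:
--     """Compute unbeaten run length (wins + draws) at each match.
--
--     Args:
--         results: Ordered list of result strings.
--
--     Returns:
--         List of unbeaten run lengths, same length as input.
--     """
--     runs: list[int] = [0]
--     for i in range(1, len(results)):
--         count = 0
--         for j in range(i - 1, -1, -1):
--             if results[j] in ("W", "D"):
--                 count += 1
--             else:
--                 break
--         runs.append(count)
--     return runs
-- ===== SOURCE B (Python) =====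
-- def _compute_unbeaten_run(results: list[str]) -> list[int]:
--     """Compute unbeaten run length (wins + draws) at each match.
--
--     Single pass: keep a running streak counter, reset on any non-W/D result.
--     """
--     runs: list[int] = [0]
--     streak = 0
--     for r in results[:-1]:
--         streak = streak + 1 if r in ("W", "D") else 0
--         runs.append(streak)
--     return runs
-- ===== Notes on version B (the rewrite author's own statement) =====
-- stated objective: faster
-- what changed: Replaced the quadratic backwards rescan before every match with a single forward pass that maintains a running streak counter reset on each loss.
import Mathlib
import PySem

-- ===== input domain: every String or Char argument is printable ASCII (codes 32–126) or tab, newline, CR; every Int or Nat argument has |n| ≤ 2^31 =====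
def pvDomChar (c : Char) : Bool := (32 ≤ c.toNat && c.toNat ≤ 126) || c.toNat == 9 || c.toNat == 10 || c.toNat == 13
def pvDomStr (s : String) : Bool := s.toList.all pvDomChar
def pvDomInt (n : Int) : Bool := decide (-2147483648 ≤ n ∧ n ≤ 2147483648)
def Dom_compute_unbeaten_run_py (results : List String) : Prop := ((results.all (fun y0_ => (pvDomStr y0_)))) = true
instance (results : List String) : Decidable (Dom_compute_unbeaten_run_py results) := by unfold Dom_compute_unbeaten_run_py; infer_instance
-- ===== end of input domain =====

-- B replaces A's quadratic backwards rescan before every match by one forward pass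
-- with a running streak counter (reset on loss); return values are identical.

-- ===== PORT A =====
-- inner loop 'for j in range(i-1,-1,-1): if results[j] in ("W","D"): count += 1 else: break',
-- ported as a downward recursion on the index (argument k means: next index to read is k-1);
-- results[j] is List.getD (exact here: every index read lies in [0, i-1] ⊆ [0, len-1])
def pvInnerA (results : List String) (count : Int) : Nat → Int
  | 0 => count
  | Nat.succ j =>
      if results.getD j "" == "W" || results.getD j "" == "D" then
        pvInnerA results (count + 1) j
      else count

def compute_unbeaten_run_py (results : List String) : List Int :=
  (PySem.List.pyRange 1 (results.length : Int)).foldl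
    (fun runs i => runs ++ [pvInnerA results 0 i.toNat]) [0]

-- ===== PORT B =====
def compute_unbeaten_run_py_alt (results : List String) : List Int :=
  ((PySem.List.slice results none (some (-1))).foldl
    (fun (st : List Int × Int) r =>
      let streak : Int := if r == "W" || r == "D" then st.2 + 1 else 0
      (st.1 ++ [streak], streak)) ([0], 0)).1

-- ===== PRECONDITION & SPEC =====
def Spec_compute_unbeaten_run_py (results : List String) (out : List Int) : Prop := out = compute_unbeaten_run_py_alt results
instance (results : List String) (out : List Int) : Decidable (Spec_compute_unbeaten_run_py results out) := by unfold Spec_compute_unbeaten_run_py; infer_instance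

-- ===== CLAIM (what is proved, stated in full; the proofs are below) =====
def Claim_equal_compute_unbeaten_run_py : Prop := ∀ (results : List String), Dom_compute_unbeaten_run_py results → Spec_compute_unbeaten_run_py results (compute_unbeaten_run_py results)

-- ===== LEMMAS AND PROOFS =====

-- length of the maximal "W"/"D" suffix of a list (the value A's inner loop computes)
def pvCrev : List String → Int
  | [] => 0
  | x :: t => if x == "W" || x == "D" then pvCrev t + 1 else 0

def pvC (l : List String) : Int := pvCrev l.reverse

theorem pvC_concat (l : List String) (x : String) :
    pvC (l ++ [x]) = if x == "W" || x == "D" then pvC l + 1 else 0 := by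
  simp [pvC, pvCrev]

-- the inner loop only reads indices below its argument
theorem pvInnerA_append (l t : List String) (c : Int) (k : Nat) (hk : k ≤ l.length) :
    pvInnerA (l ++ t) c k = pvInnerA l c k := by
  induction k generalizing c with
  | zero => rfl
  | succ j ih =>
      have hj : j < l.length := by omega
      have hget : (l ++ t).getD j "" = l.getD j "" := by
        simp [List.getD, List.getElem?_append_left hj]
      simp only [pvInnerA, hget]
      split
      · exact ih _ (by omega)
      · rfl

-- scanning the whole list backwards counts the maximal W/D suffix
theorem pvInnerA_full (l : List String) (c : Int) :
    pvInnerA l c l.length = c + pvC l := by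
  induction l using List.reverseRecOn generalizing c with
  | nil => simp [pvInnerA, pvC, pvCrev]
  | append_singleton l x ih =>
      have hlen : (l ++ [x]).length = l.length + 1 := by simp
      rw [hlen]
      have hget : (l ++ [x]).getD l.length "" = x := by
        simp [List.getD]
      simp only [pvInnerA, hget, pvC_concat]
      split
      · rw [pvInnerA_append l [x] (c + 1) l.length le_rfl, ih]
        ring
      · ring

-- A's recurrence: appending one result appends the W/D-suffix count of the old list
theorem pvA_concat (l : List String) (x s : String) :
    compute_unbeaten_run_py (l ++ [x] ++ [s]) =
      compute_unbeaten_run_py (l ++ [x]) ++ [pvC (l ++ [x])] := by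
  set m : Nat := (l ++ [x]).length with hm
  have hm1 : 1 ≤ (m : Int) := by simp [hm]
  have hlen : (((l ++ [x] ++ [s]).length : Nat) : Int) = (m : Int) + 1 := by
    simp [hm]; ring
  unfold compute_unbeaten_run_py
  rw [hlen, PySem.List.pyRange_one_succ_right hm1, List.foldl_append]
  have hcong :
      List.foldl (fun runs i => runs ++ [pvInnerA (l ++ [x] ++ [s]) 0 i.toNat]) [0]
          (PySem.List.pyRange 1 (m : Int)) =
      List.foldl (fun runs i => runs ++ [pvInnerA (l ++ [x]) 0 i.toNat]) [0]
          (PySem.List.pyRange 1 (m : Int)) := by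
    apply PySem.List.foldl_congr_mem
    intro acc i hi
    rcases PySem.List.mem_pyRange_one.mp hi with ⟨h1, h2⟩
    have : i.toNat ≤ (l ++ [x]).length := by omega
    rw [pvInnerA_append (l ++ [x]) [s] 0 i.toNat this]
  rw [hcong]
  simp only [List.foldl_cons, List.foldl_nil]
  congr 1
  rw [Int.toNat_natCast, pvInnerA_append (l ++ [x]) [s] 0 (l ++ [x]).length le_rfl,
    pvInnerA_full, zero_add]

-- B's fold state after consuming ys: (A's output on ys ++ [anything], streak = pvC ys)
theorem pvB_state (ys : List String) (s : String) :
    ys.foldl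
      (fun (st : List Int × Int) r =>
        let streak : Int := if r == "W" || r == "D" then st.2 + 1 else 0
        (st.1 ++ [streak], streak)) ([0], 0) =
    (compute_unbeaten_run_py (ys ++ [s]), pvC ys) := by
  induction ys using List.reverseRecOn generalizing s with
  | nil =>
      have : compute_unbeaten_run_py [s] = [0] := by
        unfold compute_unbeaten_run_py
        norm_num [PySem.List.pyRange]
      simp [this, pvC, pvCrev]
  | append_singleton l y ih =>
      rw [List.foldl_append, ih y]
      simp only [List.foldl_cons, List.foldl_nil, pvA_concat l y s, pvC_concat]

-- ===== VERDICT (by name: the statement is the Claim_ definition above) =====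
theorem compute_unbeaten_run_py_spec : Claim_equal_compute_unbeaten_run_py := by
  intro results _
  unfold Spec_compute_unbeaten_run_py compute_unbeaten_run_py_alt
  rw [PySem.List.slice_to_neg_one]
  induction results using List.reverseRecOn with
  | nil => rfl
  | append_singleton ys x _ =>
      rw [List.dropLast_concat, pvB_state ys x]
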